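-- pv_equiv track=rewrite | github.com/yoichiozaki/cpp-practice | leetcode/2047_number_of_valid_words_in_a_sentence.py | countValidWords
-- ===== SOURCE A (Python) =====
-- def countValidWords(sentence: str) -> int:
--     def check(word):
--         seen = False
--         for i, ch in enumerate(word):
--             if ch.isdigit() or ch in "!.," and i != len(word)-1:
--                 return False
--             elif ch == '-':
--                 if seen or i == 0 or i == len(word)-1 or not word[i+1].isalpha():
--                     return False
--                 seen = True
--         return True
--     return sum(check(word) for word in sentence.split())
-- ===== SOURCE B (Python) =====
-- def countValidWords(sentence: str) -> int:
--     count = 0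
--     for word in sentence.split():
--         n = len(word)
--         if any(ch.isdigit() for ch in word):
--             continue
--         if any(ch in "!.," and i != n - 1 for i, ch in enumerate(word)):
--             continue
--         hyphens = [i for i, ch in enumerate(word) if ch == '-']
--         if hyphens:
--             if len(hyphens) != 1:
--                 continue
--             h = hyphens[0]
--             if h == 0 or h == n - 1 or not word[h + 1].isalpha():
--                 continue
--         count += 1
--     return count
-- ===== Notes on version B (the rewrite author's own statement) =====
-- stated objective: alternative
-- what changed: A validates each word with one early-return scan that carries a hyphen-already-met flag; B instead runs separate whole-word passes: a digit scan, a punctuation-position scan, and a hyphen index-list check (empty, or a single interior index followed by a letter).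
import Mathlib
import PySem

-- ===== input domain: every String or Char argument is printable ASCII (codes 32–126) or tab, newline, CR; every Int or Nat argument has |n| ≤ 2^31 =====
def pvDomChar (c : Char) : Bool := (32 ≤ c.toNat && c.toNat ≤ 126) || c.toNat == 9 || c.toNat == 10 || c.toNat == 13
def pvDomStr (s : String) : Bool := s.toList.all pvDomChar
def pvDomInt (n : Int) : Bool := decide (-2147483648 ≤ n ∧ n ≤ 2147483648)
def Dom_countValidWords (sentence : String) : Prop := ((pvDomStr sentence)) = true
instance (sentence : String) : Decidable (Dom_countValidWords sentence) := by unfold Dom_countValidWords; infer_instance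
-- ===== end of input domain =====

-- B validates each word by separate whole-word passes (digit scan, punctuation-position
-- scan, hyphen index list) instead of A's single early-return scan with a 'seen' flag;
-- objective: alternative decomposition, same cost.


-- shared tiny helper: word[i].isalpha() for an index known to be in range when reached
def pvAlphaAt (w : List Char) (i : Int) : Bool :=
  match PySem.List.pyGet? w i with
  | some c => PySem.Chars.isalpha c
  | none => false

-- ch in "!.," (ch a single character)
def pvPunct (c : Char) : Bool := c == '!' || c == '.' || c == ','

-- ===== PORT A =====
-- A's check: one scan over enumerate(word) with early return and a 'seen' hyphen flag.
def checkA_go (word : List Char) (n : Int) : List (Int × Char) → Bool → Bool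
  | [], _ => true
  | (i, ch) :: rest, seen =>
    if PySem.Chars.isdigit ch || (pvPunct ch && i != n - 1) then false
    else if ch == '-' then
      -- word[i+1] is always in range here (i ≠ n-1 was already checked on this branch)
      if seen || i == 0 || i == n - 1 || !(pvAlphaAt word (i + 1)) then false
      else checkA_go word n rest true
    else checkA_go word n rest seen

def checkA (w : List Char) : Bool :=
  checkA_go w (w.length : Int) (PySem.List.enumerate w 0) false

def countValidWords (sentence : String) : Int :=
  ((PySem.Str.split₀ sentence).map (fun w => if checkA w.toList then (1 : Int) else 0)).sum

-- ===== PORT B =====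
-- B's check: three independent whole-word passes (see Source B).
def checkB (w : List Char) : Bool :=
  if w.any PySem.Chars.isdigit then false
  else if (PySem.List.enumerate w 0).any
      (fun p => pvPunct p.2 && p.1 != (w.length : Int) - 1) then false
  else
    match ((PySem.List.enumerate w 0).filter (fun p => p.2 == '-')).map (fun p => p.1) with
    | [] => true
    | [h] => if h == 0 || h == (w.length : Int) - 1 || !(pvAlphaAt w (h + 1)) then false
             else true
    | _ => false

def countValidWords_alt (sentence : String) : Int :=
  (PySem.Str.split₀ sentence).foldl
    (fun count w => if checkB w.toList then count + 1 else count) 0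

-- ===== PRECONDITION & SPEC =====
def Spec_countValidWords (sentence : String) (out : Int) : Prop := out = countValidWords_alt sentence
instance (sentence : String) (out : Int) : Decidable (Spec_countValidWords sentence out) := by unfold Spec_countValidWords; infer_instance

-- ===== CLAIM (what is proved, stated in full; the proofs are below) =====
def Claim_equal_countValidWords : Prop := ∀ (sentence : String), Dom_countValidWords sentence → Spec_countValidWords sentence (countValidWords sentence)

-- ===== LEMMAS AND PROOFS =====

-- hyphen-list acceptance, parameterised by the 'seen' state A carries
def hyOK (w : List Char) (n : Int) : List Int → Bool → Bool
  | [], _ => true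
  | [h], seen => !(seen || h == 0 || h == n - 1 || !(pvAlphaAt w (h + 1)))
  | _, _ => false

lemma checkA_go_eq (w : List Char) (n : Int) :
    ∀ (pairs : List (Int × Char)) (seen : Bool),
      checkA_go w n pairs seen =
        ((!pairs.any (fun p => PySem.Chars.isdigit p.2 || (pvPunct p.2 && p.1 != n - 1))) &&
          hyOK w n ((pairs.filter (fun p => p.2 == '-')).map (fun p => p.1)) seen) := by
  intro pairs
  induction pairs with
  | nil => intro seen; simp [checkA_go, hyOK]
  | cons p rest ih =>
    intro seen
    obtain ⟨i, ch⟩ := p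
    simp only [checkA_go]
    by_cases hbad : (PySem.Chars.isdigit ch || (pvPunct ch && i != n - 1)) = true
    · simp [hbad]
    · rw [if_neg hbad]
      simp only [Bool.not_eq_true] at hbad
      by_cases hhy : ch = '-'
      · subst hhy
        rw [if_pos (by decide)]
        rw [List.filter_cons_of_pos rfl, List.map_cons]
        by_cases hfail : (seen || i == 0 || i == n - 1 || !(pvAlphaAt w (i + 1))) = true
        · rw [if_pos hfail]
          cases hrest : (rest.filter (fun p => p.2 == '-')).map (fun p => p.1) with
          | nil => simp only [hyOK, hfail, Bool.not_true, Bool.and_false]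
          | cons a t => cases t <;> simp [hyOK]
        · rw [if_neg hfail]
          simp only [Bool.not_eq_true] at hfail
          have hseen : seen = false := by
            cases seen
            · rfl
            · simp at hfail
          subst hseen
          simp only [Bool.false_or] at hfail
          rw [ih true]
          cases hrest : (rest.filter (fun p => p.2 == '-')).map (fun p => p.1) with
          | nil =>
            simp only [hyOK, List.any_cons, hbad, hfail, Bool.not_false, Bool.false_or,
              Bool.and_true]
          | cons a t =>
            cases t with
            | nil =>
              simp only [hyOK, List.any_cons, hbad, Bool.false_or, Bool.true_or,
                Bool.not_true, Bool.and_false]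
            | cons b t' =>
              simp only [hyOK, List.any_cons, hbad, Bool.false_or, Bool.and_false]
      · rw [if_neg (by simpa using hhy)]
        rw [ih seen]
        rw [List.filter_cons_of_neg (by simpa using hhy)]
        simp [List.any_cons, hbad]

lemma any_or_split (l : List (Int × Char)) (p q : Int × Char → Bool) :
    l.any (fun x => p x || q x) = (l.any p || l.any q) := by
  induction l with
  | nil => rfl
  | cons a t ih => simp only [List.any_cons, ih]; ac_rfl

lemma checkA_eq_checkB (w : List Char) : checkA w = checkB w := by
  unfold checkA checkB
  rw [checkA_go_eq]
  rw [any_or_split (PySem.List.enumerate w 0)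
      (fun p => PySem.Chars.isdigit p.2) (fun p => pvPunct p.2 && p.1 != (w.length : Int) - 1)]
  have hdig : (PySem.List.enumerate w 0).any (fun p => PySem.Chars.isdigit p.2) =
      w.any PySem.Chars.isdigit := by
    conv_rhs => rw [← PySem.List.map_snd_enumerate w 0]
    rw [List.any_map]
    rfl
  rw [hdig]
  cases hd : w.any PySem.Chars.isdigit with
  | true => simp
  | false =>
    cases hp : (PySem.List.enumerate w 0).any
        (fun p => pvPunct p.2 && p.1 != (w.length : Int) - 1) with
    | true => simp
    | false =>
      simp only [Bool.or_false, Bool.not_false, Bool.true_and, Bool.false_eq_true,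
        if_false]
      cases hrest : ((PySem.List.enumerate w 0).filter (fun p => p.2 == '-')).map
          (fun p => p.1) with
      | nil => simp [hyOK]
      | cons a t =>
        cases t with
        | nil =>
          simp only [hyOK, Bool.false_or]
          cases hx : (a == 0 || a == ((w.length : Int) - 1) || !(pvAlphaAt w (a + 1))) <;>
            simp
        | cons b t' => simp [hyOK]

lemma foldl_count (l : List String) (acc : Int) :
    l.foldl (fun count w => if checkB w.toList then count + 1 else count) acc =
      acc + (l.map (fun w => if checkA w.toList then (1 : Int) else 0)).sum := by
  induction l generalizing acc with
  | nil => simp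
  | cons x t ih =>
    simp only [List.foldl_cons, List.map_cons, List.sum_cons, ih, checkA_eq_checkB]
    split_ifs <;> ring

theorem countValidWords_eq (sentence : String) :
    countValidWords sentence = countValidWords_alt sentence := by
  unfold countValidWords countValidWords_alt
  rw [foldl_count, zero_add]

-- ===== VERDICT (by name: the statement is the Claim_ definition above) =====
theorem countValidWords_spec : Claim_equal_countValidWords := by
  intro s _
  unfold Spec_countValidWords
  exact countValidWords_eq s
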